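-- pv_equiv track=rewrite | github.com/burning-calamity/extirpation | online/caesar_box.py | caesar_box_encrypt
-- ===== SOURCE A (Python) =====
-- def caesar_box_encrypt(plaintext: str, size: int = 4) -> str:
--     if size < 2:
--         raise ValueError('size must be >= 2')
--     text = plaintext.replace(' ', '')
--     rows = (len(text) + size - 1) // size
--     padded = text.ljust(rows * size, 'X')
--     grid = [padded[r * size:(r + 1) * size] for r in range(rows)]
--     return ''.join(grid[r][c] for c in range(size) for r in range(rows))
-- ===== SOURCE B (Python) =====
-- def caesar_box_encrypt(plaintext: str, size: int = 4) -> str: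
--     if size < 2:
--         raise ValueError('size must be >= 2')
--     text = plaintext.replace(' ', '')
--     rows = (len(text) + size - 1) // size
--     cols = [[] for _ in range(size)]
--     for i, ch in enumerate(text):
--         cols[i % size].append(ch)
--     return ''.join(''.join(col).ljust(rows, 'X') for col in cols)
-- ===== Notes on version B (the rewrite author's own statement) =====
-- stated objective: alternative
-- what changed: Instead of building a padded string, slicing it into a row grid and joining it with a nested column-major index loop, B distributes the characters into size column buckets in a single enumerate pass (cols[i % size].append) and then pads each column with ljust; no padded string, no grid, no nested join.
import Mathlib
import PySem

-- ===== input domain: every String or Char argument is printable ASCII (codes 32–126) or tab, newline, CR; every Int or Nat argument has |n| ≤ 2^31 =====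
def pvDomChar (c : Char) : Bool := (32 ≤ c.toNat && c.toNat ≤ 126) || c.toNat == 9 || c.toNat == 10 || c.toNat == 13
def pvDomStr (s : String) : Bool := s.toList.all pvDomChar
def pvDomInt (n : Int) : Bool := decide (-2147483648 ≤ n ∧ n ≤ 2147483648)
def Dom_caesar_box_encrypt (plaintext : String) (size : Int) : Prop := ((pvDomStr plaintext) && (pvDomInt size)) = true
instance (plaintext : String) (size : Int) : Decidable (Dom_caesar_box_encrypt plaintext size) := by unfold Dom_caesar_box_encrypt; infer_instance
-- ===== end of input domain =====

-- B replaces A's padded string + row grid + nested column-major index join by a single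
-- enumerate pass that distributes each character into one of size column buckets
-- (cols[i % size]) and then left-justifies each column (objective: alternative).

-- ===== PORT A =====
def caesar_box_encrypt (plaintext : String) (size : Int) : String :=
  let text := (PySem.Str.replace plaintext " " "").toList
  let n : Int := text.length
  let rows : Int := PySem.Int.floordiv (n + size - 1) size
  let padded := text ++ List.replicate ((rows * size - n).toNat) 'X'
  let grid := (PySem.List.pyRange 0 rows 1).map
    (fun r => PySem.List.slice padded (some (r * size)) (some ((r + 1) * size)))
  String.ofList ((PySem.List.pyRange 0 size 1).flatMap
    (fun c => (PySem.List.pyRange 0 rows 1).map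
      (fun r => PySem.List.pyGetD (PySem.List.pyGetD grid r []) c 'X')))

-- ===== PORT B =====
-- One fold step of B's enumerate loop: append ch to bucket i % size and step the counter.
-- (i and size are nonnegative on Pre_, so the counter is carried as a Nat; % is exact there.)
def pvStep (S : Nat) (st : List (List Char) × Nat) (ch : Char) : List (List Char) × Nat :=
  (st.1.modify (st.2 % S) (fun col => col ++ [ch]), st.2 + 1)

def caesar_box_encrypt_alt (plaintext : String) (size : Int) : String :=
  let text := (PySem.Str.replace plaintext " " "").toList
  let rows : Int := PySem.Int.floordiv ((text.length : Int) + size - 1) size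
  let cols := (text.foldl (pvStep size.toNat) (List.replicate size.toNat [], 0)).1
  String.ofList (cols.flatMap
    (fun col => col ++ List.replicate ((rows - col.length).toNat) 'X'))

-- ===== PRECONDITION & SPEC =====
-- Pre_ excludes exactly size < 2, where the Python A raises ValueError.
def Pre_caesar_box_encrypt (plaintext : String) (size : Int) : Prop := 2 ≤ size
instance (plaintext : String) (size : Int) : Decidable (Pre_caesar_box_encrypt plaintext size) := by unfold Pre_caesar_box_encrypt; infer_instance
def pvWitness_caesar_box_encrypt : String × Int := ("HELLO WORLD", 4)

def Spec_caesar_box_encrypt (plaintext : String) (size : Int) (out : String) : Prop := out = caesar_box_encrypt_alt plaintext size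
instance (plaintext : String) (size : Int) (out : String) : Decidable (Spec_caesar_box_encrypt plaintext size out) := by unfold Spec_caesar_box_encrypt; infer_instance

-- ===== CLAIM (what is proved, stated in full; the proofs are below) =====
def Claim_equal_caesar_box_encrypt : Prop := ∀ (plaintext : String) (size : Int), Dom_caesar_box_encrypt plaintext size → Pre_caesar_box_encrypt plaintext size → Spec_caesar_box_encrypt plaintext size (caesar_box_encrypt plaintext size)

-- ===== LEMMAS AND PROOFS =====

-- Proof-side view of one of B's buckets: the characters of t whose index is ≡ c (mod S).
def pvCol (S c : Nat) (t : List Char) : List Char :=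
  ((List.range t.length).filter (fun j => j % S = c)).map (fun j => t.getD j 'X')

theorem pvCol_nil (S c : Nat) : pvCol S c [] = [] := by simp [pvCol]

theorem pvCol_snoc (S c : Nat) (t : List Char) (ch : Char) :
    pvCol S c (t ++ [ch])
      = pvCol S c t ++ (if t.length % S = c then [ch] else []) := by
  unfold pvCol
  rw [List.length_append, List.length_singleton, List.range_succ, List.filter_append,
    List.map_append]
  congr 1
  · apply List.map_congr_left
    intro j hj
    have : j < t.length := List.mem_range.mp (List.mem_of_mem_filter hj)
    rw [List.getD_append _ _ _ _ this]
  · by_cases h : t.length % S = c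
    · simp [h]
    · simp [h]

theorem pv_modify_map_range {α : Type} (S k : Nat) (hk : k < S)
    (f : Nat → α) (g : α → α) :
    ((List.range S).map f).modify k g
      = (List.range S).map (fun c => if c = k then g (f c) else f c) := by
  apply List.ext_getElem
  · simp
  · intro i h1 h2
    simp only [List.getElem_modify, List.getElem_map, List.getElem_range]
    by_cases h : k = i <;> simp [h, eq_comm]

-- Loop invariant of B's fold: after t, the buckets are exactly pvCol and the counter is |t|.
theorem pv_fold_inv (S : Nat) (hS : 0 < S) (t : List Char) :
    t.foldl (pvStep S) (List.replicate S [], 0)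
      = ((List.range S).map (fun c => pvCol S c t), t.length) := by
  induction t using List.reverseRecOn with
  | nil =>
      rw [List.foldl_nil, Prod.mk.injEq]
      refine ⟨?_, by simp⟩
      apply List.ext_getElem
      · simp
      · intro i h1 h2
        simp [pvCol_nil]
  | append_singleton t ch ih =>
      rw [List.foldl_append, ih]
      simp only [List.foldl_cons, List.foldl_nil, pvStep, List.length_append,
        List.length_singleton]
      rw [Prod.mk.injEq]
      refine ⟨?_, rfl⟩
      rw [pv_modify_map_range S (t.length % S) (Nat.mod_lt _ hS)]
      apply List.map_congr_left
      intro c hc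
      rw [pvCol_snoc]
      by_cases h : c = t.length % S
      · simp [h]
      · have h' : ¬ t.length % S = c := fun he => h he.symm
        simp [h, h']

-- (range S).filter (· = c) = [c] for c < S.
theorem pv_range_filter_single (S c : Nat) (hc : c < S) :
    (List.range S).filter (fun d => decide (d = c)) = [c] := by
  induction S with
  | zero => omega
  | succ S' ih =>
      rw [List.range_succ, List.filter_append]
      by_cases h : c = S'
      · subst h
        rw [List.filter_eq_nil_iff.mpr (by intro a ha; simp at ha ⊢; omega)]
        simp
      · rw [ih (by omega)]
        simp [Ne.symm h]

-- ((range (R*S)).filter (· % S = c)) enumerates c, c+S, …, c+S*(R-1).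
theorem pv_filter_mod_range (S c : Nat) (hc : c < S) :
    ∀ R : Nat, (List.range (R * S)).filter (fun j => j % S = c)
      = (List.range R).map (fun k => c + S * k) := by
  intro R
  induction R with
  | zero => simp
  | succ R ih =>
      have h1 : (R + 1) * S = R * S + S := by ring
      rw [h1, List.range_add, List.filter_append, ih, List.range_succ, List.map_append]
      congr 1
      rw [List.filter_map]
      have h3 : ∀ d ∈ List.range S,
          ((fun j => decide (j % S = c)) ∘ (fun ofs => R * S + ofs)) d
            = decide (d = c) := by
        intro d hd
        have hdS : d < S := List.mem_range.mp hd
        simp [Function.comp, Nat.mul_add_mod, Nat.mod_eq_of_lt hdS]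
      rw [List.filter_congr h3, pv_range_filter_single S c hc]
      simp only [List.map_cons, List.map_nil, List.cons.injEq, and_true]
      ring

-- The strided reads A makes from the padded string are pvCol of the unpadded text plus X-padding.
theorem pv_pad_split (S c R : Nat) (hc : c < S) (t : List Char) (hn : t.length ≤ R * S) :
    (List.range R).map
        (fun k => (t ++ List.replicate (R * S - t.length) 'X').getD (c + S * k) 'X')
      = pvCol S c t ++ List.replicate (R - (pvCol S c t).length) 'X' := by
  set p := t ++ List.replicate (R * S - t.length) 'X' with hp
  have key : (List.range R).map (fun k => p.getD (c + S * k) 'X')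
      = ((List.range (R * S)).filter (fun j => j % S = c)).map (fun j => p.getD j 'X') := by
    rw [pv_filter_mod_range S c hc R, List.map_map]
    rfl
  rw [key]
  have hsplit : R * S = t.length + (R * S - t.length) := by omega
  rw [hsplit, List.range_add, List.filter_append, List.map_append]
  congr 1
  · apply List.map_congr_left
    intro j hj
    have : j < t.length := List.mem_range.mp (List.mem_of_mem_filter hj)
    rw [hp, List.getD_append _ _ _ _ this]
  · -- all reads beyond |t| hit the X padding …
    have hconst : ∀ j ∈ ((List.range (R * S - t.length)).map (fun ofs => t.length + ofs)).filter
        (fun j => j % S = c), p.getD j 'X' = 'X' := by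
      intro j hj
      have hj' := List.mem_of_mem_filter hj
      obtain ⟨ofs, hofs, rfl⟩ := List.mem_map.mp hj'
      rw [hp, List.getD_append_right _ _ _ _ (Nat.le_add_right _ _)]
      simp [List.getD]
    rw [List.map_congr_left hconst, List.map_const']
    -- … and there are exactly R - |pvCol| of them
    congr 1
    have hR : ((List.range (R * S)).filter (fun j => j % S = c)).length = R := by
      rw [pv_filter_mod_range S c hc R, List.length_map, List.length_range]
    rw [hsplit, List.range_add, List.filter_append, List.length_append] at hR
    have hcol : (pvCol S c t).length
        = ((List.range t.length).filter (fun j => j % S = c)).length := by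
      simp [pvCol]
    omega

-- One column as A reads it: grid[r][c] for r in range(rows) is padded at indices c, c+S, ...
theorem pv_colA (p : List Char) (R S : Nat) (hS : 0 < S) (hlen : p.length = R * S)
    (c : Int) (hc0 : 0 ≤ c) (hcS : c < (S : Int)) :
    ((PySem.List.pyRange 0 (R : Int) 1).map (fun r =>
        PySem.List.pyGetD
          (PySem.List.pyGetD
            ((PySem.List.pyRange 0 (R : Int) 1).map
              (fun r' => PySem.List.slice p (some (r' * S)) (some ((r' + 1) * S)))) r [])
          c 'X'))
      = (List.range R).map (fun k => p.getD (c.toNat + S * k) 'X') := by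
  obtain ⟨c', rfl⟩ : ∃ c' : Nat, c = (c' : Int) := ⟨c.toNat, (Int.toNat_of_nonneg hc0).symm⟩
  have hc'S : c' < S := by exact_mod_cast hcS
  simp only [Int.toNat_natCast]
  rw [PySem.List.pyRange_one 0 (R : Int)]
  simp only [zero_add, Int.sub_zero, Int.toNat_natCast, List.map_map]
  apply List.map_congr_left
  intro k hk
  have hkR : k < R := List.mem_range.mp hk
  simp only [Function.comp, PySem.List.pyGetD_natCast,
    PySem.List.getD_map_range _ R k [] hkR]
  have hrow : PySem.List.slice p (some ((k : Int) * S)) (some (((k : Int) + 1) * S))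
      = (p.drop (k * S)).take S := by
    rw [PySem.List.slice_toNat p (by positivity) (by positivity)]
    have e1 : ((k : Int) + 1) * S = (((k + 1) * S : ℕ) : Int) := by push_cast; ring
    have e2 : (k : Int) * S = ((k * S : ℕ) : Int) := by push_cast; ring
    rw [e1, e2, Int.toNat_natCast, Int.toNat_natCast]
    congr 1
    rw [Nat.add_mul, Nat.one_mul]
    omega
  rw [hrow]
  have h4 : k * S + S ≤ R * S := by
    have := Nat.mul_le_mul_right S (Nat.succ_le_of_lt hkR)
    rwa [Nat.succ_mul] at this
  have hlen2 : ((p.drop (k * S)).take S).length = S := by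
    simp [hlen]
    omega
  have hidx : c' + S * k < p.length := by
    have c1 : S * k = k * S := Nat.mul_comm S k
    omega
  rw [List.getD_eq_getElem _ 'X' (show c' < ((p.drop (k * S)).take S).length by
        rw [hlen2]; exact hc'S),
    List.getD_eq_getElem p 'X' hidx]
  rw [List.getElem_take, List.getElem_drop]
  congr 1
  rw [Nat.mul_comm k S]
  omega

-- ===== VERDICT (by name: the statement is the Claim_ definition above) =====
set_option maxHeartbeats 1000000 in
theorem caesar_box_encrypt_spec : Claim_equal_caesar_box_encrypt := by
  intro plaintext size _hdom hpre
  unfold Spec_caesar_box_encrypt caesar_box_encrypt caesar_box_encrypt_alt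
  dsimp only
  have hS2 : (2 : Int) ≤ size := hpre
  obtain ⟨S, hSe⟩ : ∃ S : Nat, size = (S : Int) :=
    ⟨size.toNat, (Int.toNat_of_nonneg (by omega)).symm⟩
  subst hSe
  have hS : 0 < S := by omega
  set text := (PySem.Str.replace plaintext " " "").toList with htext
  set n : Int := (text.length : Int) with hn
  set rows : Int := PySem.Int.floordiv (n + (S : Int) - 1) (S : Int) with hrows
  have hdiv := (PySem.Int.floordiv_eq_iff_of_pos (a := n + (S : Int) - 1) (b := (S : Int))
      (q := rows) (by exact_mod_cast hS)).mp hrows.symm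
  have hn0 : 0 ≤ n := by positivity
  have hrows0 : 0 ≤ rows := by nlinarith [hdiv.1, hdiv.2]
  have hceil : n ≤ rows * (S : Int) := by nlinarith [hdiv.2]
  obtain ⟨R, hR⟩ : ∃ R : Nat, rows = (R : Int) := ⟨rows.toNat, (Int.toNat_of_nonneg hrows0).symm⟩
  rw [hR] at hceil ⊢
  have hpadeq : ((R : Int) * (S : Int) - n).toNat = R * S - text.length := by
    have e : (R : Int) * (S : Int) = ((R * S : Nat) : Int) := by push_cast; ring
    rw [e, hn, Int.toNat_sub]
  have hnle : text.length ≤ R * S := by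
    have : n ≤ ((R * S : Nat) : Int) := by push_cast; exact_mod_cast hceil
    rw [hn] at this
    exact_mod_cast this
  have hlen : (text ++ List.replicate (((R : Int) * (S : Int) - n).toNat) 'X').length = R * S := by
    rw [List.length_append, List.length_replicate, hpadeq]
    omega
  rw [Int.toNat_natCast, pv_fold_inv S hS text]
  rw [PySem.List.pyRange_one 0 (S : Int)]
  simp only [zero_add, Int.sub_zero, Int.toNat_natCast, List.flatMap_map]
  apply congrArg String.ofList
  apply List.flatMap_congr
  intro c hc
  have hcS : c < S := List.mem_range.mp hc
  rw [pv_colA _ R S hS hlen (c : Int) (by positivity) (by exact_mod_cast hcS)]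
  simp only [Int.toNat_natCast]
  rw [hpadeq, pv_pad_split S c R hcS text hnle]
  rw [Int.toNat_sub R (pvCol S c text).length]
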